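-- pv_equiv track=rewrite | github.com/bingle123/LanhuSaas | framework/system_config/crawl_template.py | remove_dot
-- ===== SOURCE A (Python) =====
-- def remove_dot(string):
--     """
--     去除URL的‘.’字符
--     :param string:
--     :return:
--     """
--     first = string[:1]
--     second = string[:2]
--     if first == '.':
--         return remove_dot(string.lstrip('.'))
--     if second == '/.':
--         return remove_dot(string.lstrip('/'))
--     if first == '/':
--         return string
--     if first == 'h':
--         return string
-- ===== SOURCE B (Python) =====
-- def remove_dot(string):
--     # Single-pass index scan: advance past leading '.' chars and past a '/'
--     # only when it is immediately followed by '.', then classify the suffix.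
--     n = len(string)
--     p = 0
--     while p < n:
--         c = string[p]
--         if c == '.':
--             p += 1
--         elif c == '/' and p + 1 < n and string[p + 1] == '.':
--             p += 1
--         else:
--             break
--     t = string[p:]
--     if t[:1] in ('/', 'h'):
--         return t
--     return None
-- ===== Notes on version B (the rewrite author's own statement) =====
-- stated objective: alternative
-- what changed: A's self-recursion that repeatedly reslices (string[:1]/string[:2]) and rebuilds the string with lstrip is replaced by a single-pass index scan that only advances a pointer and slices the suffix once at the end.
import Mathlib
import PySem

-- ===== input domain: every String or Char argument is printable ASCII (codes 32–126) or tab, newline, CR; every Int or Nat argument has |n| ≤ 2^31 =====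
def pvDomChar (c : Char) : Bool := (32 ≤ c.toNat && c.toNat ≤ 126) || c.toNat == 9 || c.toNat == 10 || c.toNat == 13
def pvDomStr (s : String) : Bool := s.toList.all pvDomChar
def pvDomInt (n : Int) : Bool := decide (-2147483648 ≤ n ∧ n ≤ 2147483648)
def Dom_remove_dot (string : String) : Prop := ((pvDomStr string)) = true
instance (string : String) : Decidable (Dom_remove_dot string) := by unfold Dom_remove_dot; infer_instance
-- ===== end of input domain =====

-- B replaces A's recursion with slicing/lstrip by a single-pass index scan over the
-- characters, then one suffix classification (objective: alternative).


-- ===== PORT A =====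
-- A's recursion over the string: string[:1] / string[:2] are `take 1` / `take 2`,
-- lstrip('.') / lstrip('/') are `dropWhile` on the respective character (exact here).
def removeDotA (l : List Char) : Option (List Char) :=
  if h1 : l.take 1 = ['.'] then
    removeDotA (l.dropWhile (· == '.'))
  else if l.take 2 = ['/', '.'] then
    removeDotA (l.dropWhile (· == '/'))
  else if l.take 1 = ['/'] then some l
  else if l.take 1 = ['h'] then some l
  else none
termination_by l.length
decreasing_by
  · cases l with
    | nil => simp at h1
    | cons c rest =>
      simp [List.take_succ_cons] at h1
      subst h1
      simpa [List.dropWhile_cons] using Nat.lt_succ_of_le (List.length_dropWhile_le _ rest)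
  · rename_i h2
    cases l with
    | nil => simp at h2
    | cons c rest =>
      cases rest with
      | nil => simp [List.take_succ_cons] at h2
      | cons d r =>
        simp [List.take_succ_cons] at h2
        obtain ⟨hc, hd⟩ := h2
        subst hc; subst hd
        simpa [List.dropWhile_cons] using Nat.lt_succ_of_le (List.length_dropWhile_le _ ('.' :: r))

def remove_dot (string : String) : Option String :=
  (removeDotA string.toList).map String.ofList

-- ===== PORT B =====
-- Source B's index loop: advance p past a '.', or past a '/' immediately followed by '.'.
def stripIdxB (cs : List Char) (p : Nat) : Nat :=
  if h : p < cs.length then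
    if cs[p] = '.' then stripIdxB cs (p + 1)
    else if cs[p] = '/' ∧ p + 1 < cs.length ∧ cs[p + 1]! = '.' then stripIdxB cs (p + 1)
    else p
  else p
termination_by cs.length - p

def remove_dot_alt (string : String) : Option String :=
  if (string.toList.drop (stripIdxB string.toList 0)).take 1 = ['/'] ∨
     (string.toList.drop (stripIdxB string.toList 0)).take 1 = ['h'] then
    some (String.ofList (string.toList.drop (stripIdxB string.toList 0)))
  else none

-- ===== PRECONDITION & SPEC =====
def Spec_remove_dot (string : String) (out : Option String) : Prop := out = remove_dot_alt string
instance (string : String) (out : Option String) : Decidable (Spec_remove_dot string out) := by unfold Spec_remove_dot; infer_instance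

-- ===== CLAIM (what is proved, stated in full; the proofs are below) =====
def Claim_equal_remove_dot : Prop := ∀ (string : String), Dom_remove_dot string → Spec_remove_dot string (remove_dot string)

-- ===== LEMMAS AND PROOFS =====

-- mid-level structural stripper used only by the proof
def stripS : List Char → List Char
  | '.' :: rest => stripS rest
  | '/' :: '.' :: rest => stripS ('.' :: rest)
  | l => l

theorem stripS_dot (rest : List Char) : stripS ('.' :: rest) = stripS rest := rfl

theorem stripS_slash_dot (rest : List Char) :
    stripS ('/' :: '.' :: rest) = stripS ('.' :: rest) := rfl

theorem stripS_base (l : List Char)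
    (h1 : l.take 1 ≠ ['.']) (h2 : l.take 2 ≠ ['/', '.']) : stripS l = l := by
  match l with
  | [] => rfl
  | '.' :: rest => exact absurd rfl h1
  | '/' :: '.' :: rest => exact absurd rfl h2
  | [c] =>
      unfold stripS
      split
      · rename_i heq; injection heq with hc _; exact absurd (by simp [hc]) h1
      · rename_i heq; exact absurd heq.symm (by simp)
      · rfl
  | c :: d :: rest =>
      unfold stripS
      split
      · rename_i heq; injection heq with hc _; exact absurd (by simp [hc]) h1
      · rename_i heq
        injection heq with hc htl; injection htl with hd _
        exact absurd (by simp [List.take_succ_cons, hc, hd]) h2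
      · rfl

theorem stripS_dropWhile_dot (l : List Char) :
    stripS (l.dropWhile (· == '.')) = stripS l := by
  induction l with
  | nil => rfl
  | cons c rest ih =>
      by_cases hc : c = '.'
      · subst hc
        rw [List.dropWhile_cons]
        simpa using ih
      · rw [List.dropWhile_cons]
        simp [hc]

-- A computes the classification of stripS
theorem removeDotA_eq_stripS (l : List Char) :
    removeDotA l =
      (if (stripS l).take 1 = ['/'] ∨ (stripS l).take 1 = ['h']
       then some (stripS l) else none) := by
  induction hn : l.length using Nat.strong_induction_on generalizing l with
  | _ n ih =>
  subst hn
  rw [removeDotA]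
  split
  · rename_i h1
    cases l with
    | nil => simp at h1
    | cons c rest =>
      simp [List.take_succ_cons] at h1
      subst h1
      rw [ih _ (by simpa [List.dropWhile_cons] using Nat.lt_succ_of_le (List.length_dropWhile_le _ rest)) _ rfl]
      rw [show ('.' :: rest).dropWhile (· == '.') = rest.dropWhile (· == '.') from by simp [List.dropWhile_cons]]
      rw [stripS_dropWhile_dot, stripS_dot]
  · split
    · rename_i h1 h2
      cases l with
      | nil => simp at h2
      | cons c rest =>
        cases rest with
        | nil => simp [List.take_succ_cons] at h2
        | cons d r =>
          simp [List.take_succ_cons] at h2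
          obtain ⟨hc, hd⟩ := h2
          subst hc; subst hd
          rw [ih _ (by simpa [List.dropWhile_cons] using Nat.lt_succ_of_le (List.length_dropWhile_le _ ('.' :: r))) _ rfl]
          rw [show ('/' :: '.' :: r).dropWhile (· == '/') = ('.' :: r).dropWhile (· == '/') from by simp [List.dropWhile_cons]]
          rw [show ('.' :: r).dropWhile (· == '/') = '.' :: r from by simp [List.dropWhile_cons]]
          rw [stripS_slash_dot]
    · rename_i h1 h2
      rw [stripS_base l h1 h2]
      split
      · rename_i h3; simp [h3]
      · split
        · rename_i h3 h4; simp [h4]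
        · rename_i h3 h4; simp [h3, h4]

-- B's index scan computes the same stripped suffix
theorem drop_stripIdxB (cs : List Char) (p : Nat) (hp : p ≤ cs.length) :
    cs.drop (stripIdxB cs p) = stripS (cs.drop p) := by
  induction hn : cs.length - p using Nat.strong_induction_on generalizing p with
  | _ n ih =>
  subst hn
  rw [stripIdxB]
  split
  · rename_i h
    split
    · rename_i hc
      rw [ih (cs.length - (p + 1)) (by omega) (p + 1) (by omega) rfl]
      rw [List.drop_eq_getElem_cons h, hc, stripS_dot]
    · split
      · rename_i hc hpat
        obtain ⟨hslash, hlt, hdot⟩ := hpat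
        rw [ih (cs.length - (p + 1)) (by omega) (p + 1) (by omega) rfl]
        rw [List.drop_eq_getElem_cons h, List.drop_eq_getElem_cons hlt]
        rw [hslash]
        rw [show cs[p + 1]! = cs[p + 1] from getElem!_pos cs (p + 1) hlt] at hdot
        rw [hdot, stripS_slash_dot, stripS_dot]
      · rename_i hc hpat
        -- loop stops: cs.drop p is not a stripS redex
        rw [List.drop_eq_getElem_cons h]
        cases hrest : cs.drop (p + 1) with
        | nil =>
          exact (stripS_base _ (by simp [List.take_succ_cons, hc]) (by simp)).symm
        | cons d r =>
          have hlt : p + 1 < cs.length := by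
            by_contra hge
            rw [List.drop_eq_nil_of_le (by omega)] at hrest; simp at hrest
          have hd : d = cs[p + 1] := by
            have := List.drop_eq_getElem_cons hlt
            rw [hrest] at this; exact (List.cons.injEq _ _ _ _ ▸ this).1
          symm
          apply stripS_base
          · simp [List.take_succ_cons, hc]
          · simp only [List.take_succ_cons, ne_eq, List.cons.injEq]
            intro ⟨h1, h2, _⟩
            apply hpat
            refine ⟨h1, hlt, ?_⟩
            rw [getElem!_pos cs (p + 1) hlt, ← hd]
            exact h2.symm ▸ rfl
  · rename_i h
    have : p = cs.length := by omega
    subst this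
    simp [List.drop_eq_nil_of_le, stripS]

-- ===== VERDICT (by name: the statement is the Claim_ definition above) =====
theorem remove_dot_spec : Claim_equal_remove_dot := by
  intro s _
  unfold Spec_remove_dot remove_dot remove_dot_alt
  rw [removeDotA_eq_stripS]
  have key : List.drop (stripIdxB s.toList 0) s.toList = stripS s.toList := by
    rw [drop_stripIdxB s.toList 0 (Nat.zero_le _), List.drop_zero]
  rw [key]
  split
  · rename_i h; simp [h]
  · rename_i h; simp [h]
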